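-- pv_equiv track=rewrite | github.com/ZDawang/TianChi_flyAI | res/GRASP_fly_df_advance_difftype_4_4.py | findSameStartport
-- ===== SOURCE A (Python) =====
-- def findSameStartport(FlightD, FlightList1, FlightList2):
--     if not FlightList1 or not FlightList2:
--         return []
--
--     l1, l2 = len(FlightList1), len(FlightList2)
--     startports1 = {}
--     for i in range(l1):
--         port = FlightList1[i]
--         if FlightD[port][4] in startports1:
--             startports1[FlightD[port][4]].append(i)
--         else:
--             startports1[FlightD[port][4]] = [i]
--     res = []
--     for j in range(l2):
--         port = FlightD[FlightList2[j]][4]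
--         if port in startports1:
--             for i in startports1[port]:
--                 res.append([i, j])
--     return res
-- ===== SOURCE B (Python) =====
-- def findSameStartport(FlightD, FlightList1, FlightList2):
--     if not FlightList1 or not FlightList2:
--         return []
--     res = []
--     for j in range(len(FlightList2)):
--         port2 = FlightD[FlightList2[j]][4]
--         for i in range(len(FlightList1)):
--             if FlightD[FlightList1[i]][4] == port2:
--                 res.append([i, j])
--     return res
-- ===== Notes on version B (the rewrite author's own statement) =====
-- stated objective: simpler
-- what changed: Replaced the dictionary-grouping pass (build index-lists per startport, then look up each flight of the second list) by a direct nested scan that compares the two startports and appends [i, j] immediately, producing the pairs in the same order.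
import Mathlib
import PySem

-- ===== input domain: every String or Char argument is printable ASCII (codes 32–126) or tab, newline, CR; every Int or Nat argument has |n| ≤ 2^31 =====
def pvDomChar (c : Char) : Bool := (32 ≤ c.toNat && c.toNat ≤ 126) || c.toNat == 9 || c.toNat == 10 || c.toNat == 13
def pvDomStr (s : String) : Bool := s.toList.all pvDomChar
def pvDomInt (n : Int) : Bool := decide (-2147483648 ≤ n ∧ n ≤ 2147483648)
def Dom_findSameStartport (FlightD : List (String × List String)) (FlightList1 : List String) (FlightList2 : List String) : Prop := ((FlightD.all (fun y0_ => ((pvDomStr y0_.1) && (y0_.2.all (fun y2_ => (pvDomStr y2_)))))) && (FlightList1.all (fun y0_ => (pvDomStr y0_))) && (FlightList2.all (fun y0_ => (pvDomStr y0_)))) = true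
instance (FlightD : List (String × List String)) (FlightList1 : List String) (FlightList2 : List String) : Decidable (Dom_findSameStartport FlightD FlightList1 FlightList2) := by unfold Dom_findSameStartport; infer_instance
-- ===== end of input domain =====

-- B replaces A's dictionary-grouping pass by a direct nested scan over both flight lists (simpler; same output order).


-- ===== PORT A =====
-- FlightD[port][4]: dict lookup (first match) then index 4; the "" / [] defaults are unreachable under Pre_.
def flightKey (FlightD : List (String × List String)) (port : String) : String :=
  PySem.List.pyGetD (((PySem.Dict.mk FlightD).get? port).getD []) (4 : Int) ""

def findSameStartport (FlightD : List (String × List String)) (FlightList1 : List String) (FlightList2 : List String) : List (List Int) :=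
  if FlightList1.isEmpty || FlightList2.isEmpty then []
  else
    let l1 : Int := PySem.List.len FlightList1
    let l2 : Int := PySem.List.len FlightList2
    let startports1 : PySem.Dict String (List Int) :=
      (PySem.List.pyRange 0 l1 1).foldl (fun d i =>
        let k := flightKey FlightD (PySem.List.pyGetD FlightList1 i "")
        if d.contains k then d.insert k (d.getD k [] ++ [i]) else d.insert k [i]) PySem.Dict.empty
    (PySem.List.pyRange 0 l2 1).foldl (fun res j =>
      let port := flightKey FlightD (PySem.List.pyGetD FlightList2 j "")
      if startports1.contains port then
        (startports1.getD port []).foldl (fun r i => r ++ [[i, j]]) res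
      else res) []

-- ===== PORT B =====
def findSameStartport_alt (FlightD : List (String × List String)) (FlightList1 : List String) (FlightList2 : List String) : List (List Int) :=
  if FlightList1.isEmpty || FlightList2.isEmpty then []
  else
    (PySem.List.pyRange 0 (PySem.List.len FlightList2) 1).foldl (fun res j =>
      let port2 := flightKey FlightD (PySem.List.pyGetD FlightList2 j "")
      (PySem.List.pyRange 0 (PySem.List.len FlightList1) 1).foldl (fun r i =>
        if flightKey FlightD (PySem.List.pyGetD FlightList1 i "") == port2 then r ++ [[i, j]] else r) res) []

-- ===== PRECONDITION & SPEC =====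
-- Pre_ excludes exactly the inputs where Python A raises: when both lists are nonempty, every flight
-- id in either list must be a key of FlightD whose value list has at least 5 elements (else KeyError/IndexError).
def pvKeyOK (FlightD : List (String × List String)) (p : String) : Bool :=
  match (PySem.Dict.mk FlightD).get? p with
  | some v => decide (5 ≤ v.length)
  | none => false

def Pre_findSameStartport (FlightD : List (String × List String)) (FlightList1 : List String) (FlightList2 : List String) : Prop :=
  FlightList1 = [] ∨ FlightList2 = [] ∨ ((FlightList1 ++ FlightList2).all (fun p => pvKeyOK FlightD p)) = true
instance (FlightD : List (String × List String)) (FlightList1 : List String) (FlightList2 : List String) : Decidable (Pre_findSameStartport FlightD FlightList1 FlightList2) := by unfold Pre_findSameStartport; infer_instance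

def pvWitness_findSameStartport : (List (String × List String)) × List String × List String :=
  ([("f1", ["a", "b", "c", "d", "P"]), ("f2", ["a", "b", "c", "d", "P"])], ["f1", "f2"], ["f2"])

def Spec_findSameStartport (FlightD : List (String × List String)) (FlightList1 : List String) (FlightList2 : List String) (out : List (List Int)) : Prop := out = findSameStartport_alt FlightD FlightList1 FlightList2
instance (FlightD : List (String × List String)) (FlightList1 : List String) (FlightList2 : List String) (out : List (List Int)) : Decidable (Spec_findSameStartport FlightD FlightList1 FlightList2 out) := by unfold Spec_findSameStartport; infer_instance

-- ===== CLAIM (what is proved, stated in full; the proofs are below) =====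
def Claim_equal_findSameStartport : Prop := ∀ (FlightD : List (String × List String)) (FlightList1 : List String) (FlightList2 : List String), Dom_findSameStartport FlightD FlightList1 FlightList2 → Pre_findSameStartport FlightD FlightList1 FlightList2 → Spec_findSameStartport FlightD FlightList1 FlightList2 (findSameStartport FlightD FlightList1 FlightList2)

-- ===== LEMMAS AND PROOFS =====

-- A's grouping step (if contains: append else fresh) is exactly dict.modify with default [].
lemma step_eq_modify (d : PySem.Dict String (List Int)) (k : String) (i : Int) :
    (if d.contains k then d.insert k (d.getD k [] ++ [i]) else d.insert k [i])
      = d.modify k [] (· ++ [i]) := by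
  unfold PySem.Dict.modify
  split_ifs with h
  · rfl
  · rw [PySem.Dict.getD_of_not_contains (h := by simpa using h)]
    simp

-- A's dict-building loop over any index list, with any key function: what getD returns afterwards.
lemma build_getD (k1 : Int → String) (R1 : List Int) (p : String) :
    (R1.foldl (fun d i => if d.contains (k1 i) then d.insert (k1 i) (d.getD (k1 i) [] ++ [i]) else d.insert (k1 i) [i]) PySem.Dict.empty).getD p []
      = R1.filter (fun i => k1 i == p) := by
  have hfold : (R1.foldl (fun d i => if d.contains (k1 i) then d.insert (k1 i) (d.getD (k1 i) [] ++ [i]) else d.insert (k1 i) [i]) PySem.Dict.empty)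
      = (R1.foldl (fun d i => d.modify (k1 i) [] (· ++ [i])) PySem.Dict.empty) :=
    PySem.List.foldl_congr_mem R1 _ _ PySem.Dict.empty (fun d i _ => step_eq_modify d (k1 i) i)
  rw [hfold]
  have h := PySem.Dict.getD_foldl_modify_append (l := R1.map (fun i => (k1 i, i))) (d := PySem.Dict.empty) (c := p)
  rw [List.foldl_map] at h
  simp only [List.filter_map, List.map_map, Function.comp_def] at h
  simpa using h

-- If a startport is absent from the built dict, no index of R1 has that key.
lemma build_contains (k1 : Int → String) (R1 : List Int) (p : String)
    (h : (R1.foldl (fun d i => if d.contains (k1 i) then d.insert (k1 i) (d.getD (k1 i) [] ++ [i]) else d.insert (k1 i) [i]) PySem.Dict.empty).contains p = false) :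
    R1.filter (fun i => k1 i == p) = [] := by
  have hfold : (R1.foldl (fun d i => if d.contains (k1 i) then d.insert (k1 i) (d.getD (k1 i) [] ++ [i]) else d.insert (k1 i) [i]) PySem.Dict.empty)
      = (R1.foldl (fun d i => d.modify (k1 i) [] (· ++ [i])) PySem.Dict.empty) :=
    PySem.List.foldl_congr_mem R1 _ _ PySem.Dict.empty (fun d i _ => step_eq_modify d (k1 i) i)
  rw [hfold] at h
  rw [List.filter_eq_nil_iff]
  intro i hi hpi
  have hc : (R1.foldl (fun d i => d.modify (k1 i) [] (· ++ [i])) PySem.Dict.empty).contains p = true := by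
    rw [PySem.Dict.contains_iff_mem_keys, PySem.Dict.keys_foldl_modify_key (key := k1)]
    simp only [PySem.Dict.keys_empty, PySem.Set.update_nil_left, PySem.Set.mem_ofList]
    exact List.mem_map.mpr ⟨i, hi, by simpa using hpi⟩
  rw [h] at hc; exact Bool.false_ne_true hc

-- Core equality: A's dict pass + lookup pass equals B's nested scan, for any key functions and index ranges.
lemma scan_eq (k1 k2 : Int → String) (R1 R2 : List Int) :
    R2.foldl (fun res j =>
      if ((R1.foldl (fun d i => if d.contains (k1 i) then d.insert (k1 i) (d.getD (k1 i) [] ++ [i]) else d.insert (k1 i) [i]) PySem.Dict.empty).contains (k2 j)) then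
        ((R1.foldl (fun d i => if d.contains (k1 i) then d.insert (k1 i) (d.getD (k1 i) [] ++ [i]) else d.insert (k1 i) [i]) PySem.Dict.empty).getD (k2 j) []).foldl (fun r i => r ++ [[i, j]]) res
      else res) []
    = R2.foldl (fun res j => R1.foldl (fun r i => if k1 i == k2 j then r ++ [[i, j]] else r) res) [] := by
  apply PySem.List.foldl_congr_mem
  intro res j _
  rw [PySem.List.foldl_append_if (p := fun i => k1 i == k2 j) (f := fun i => [i, j])]
  by_cases hc : (R1.foldl (fun d i => if d.contains (k1 i) then d.insert (k1 i) (d.getD (k1 i) [] ++ [i]) else d.insert (k1 i) [i]) PySem.Dict.empty).contains (k2 j) = true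
  · rw [if_pos hc, build_getD, PySem.List.foldl_append_singleton_eq_map]
  · rw [if_neg hc, build_contains k1 R1 (k2 j) (by simpa using hc)]
    simp

-- ===== VERDICT (by name: the statement is the Claim_ definition above) =====
theorem findSameStartport_spec : Claim_equal_findSameStartport := by
  intro FlightD FlightList1 FlightList2 _ _
  unfold Spec_findSameStartport findSameStartport findSameStartport_alt
  by_cases hg : (FlightList1.isEmpty || FlightList2.isEmpty) = true
  · rw [if_pos hg, if_pos hg]
  · rw [if_neg hg, if_neg hg]
    exact scan_eq (fun i => flightKey FlightD (PySem.List.pyGetD FlightList1 i ""))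
      (fun j => flightKey FlightD (PySem.List.pyGetD FlightList2 j ""))
      (PySem.List.pyRange 0 (PySem.List.len FlightList1) 1)
      (PySem.List.pyRange 0 (PySem.List.len FlightList2) 1)
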